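-- pv_equiv track=rewrite | github.com/ITRI-AIdea/CTSP-job-shop-scheduling | attend.py | compute_idle
-- ===== SOURCE A (Python) =====
-- def compute_idle(routine, idle):
--     last = 0
--     down = 0
--     if not routine:
--         idle = []
--         return 0
--     for p in routine:
--         down += p[0] - last
--         idle.append(down)
--         last = p[1]
--     return routine[-1][1] - down
-- ===== SOURCE B (Python) =====
-- def compute_idle(routine, idle):
--     if not routine:
--         return 0
--     # gap before each period: start minus previous end (0 before the first)
--     gaps = [routine[0][0]] + [routine[i][0] - routine[i - 1][1]
--                               for i in range(1, len(routine))]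
--     run = 0
--     for g in gaps:
--         run += g
--         idle.append(run)
--     # total active time: last end minus accumulated idle telescopes to sum of durations
--     return sum(e - s for s, e in routine)
-- ===== Notes on version B (the rewrite author's own statement) =====
-- stated objective: simpler
-- what changed: B returns the total active time directly as the telescoped sum of period durations sum(e-s) instead of tracking a running 'last'/'down' pair and subtracting from the final end, and fills idle from an explicitly built gap list.
import Mathlib
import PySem

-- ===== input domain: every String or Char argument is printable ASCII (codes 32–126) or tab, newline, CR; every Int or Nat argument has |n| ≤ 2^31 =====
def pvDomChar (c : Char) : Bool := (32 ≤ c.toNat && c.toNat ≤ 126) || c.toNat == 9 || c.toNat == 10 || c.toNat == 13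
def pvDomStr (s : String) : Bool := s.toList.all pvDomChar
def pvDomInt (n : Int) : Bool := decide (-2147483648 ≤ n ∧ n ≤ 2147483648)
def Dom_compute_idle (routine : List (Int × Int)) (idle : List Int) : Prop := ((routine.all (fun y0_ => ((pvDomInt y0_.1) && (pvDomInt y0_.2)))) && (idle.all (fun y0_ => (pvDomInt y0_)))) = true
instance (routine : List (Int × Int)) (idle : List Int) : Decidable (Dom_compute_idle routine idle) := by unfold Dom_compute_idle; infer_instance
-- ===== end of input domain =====

-- ===== PORT A =====
-- A mutates `idle` in place (appends the running idle totals); B performs the same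
-- appends. The equivalence proved here is about the RETURN value only.
-- Port of A. The appends to `idle` do not affect the return value; the fold carries
-- A's loop state (last, down) exactly.
def compute_idle (routine : List (Int × Int)) (idle : List Int) : Int :=
  if routine.isEmpty then 0
  else
    let st := routine.foldl (fun (st : Int × Int) p => (p.2, st.2 + (p.1 - st.1))) (0, 0)
    ((PySem.List.pyGet? routine (-1)).getD (0, 0)).2 - st.2

-- ===== PORT B =====
-- Port of B. B's gap list / prefix-sum loop only feeds the `idle` mutation, which is
-- outside the return value; the returned value is the sum of durations.
def compute_idle_alt (routine : List (Int × Int)) (idle : List Int) : Int :=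
  if routine.isEmpty then 0
  else (routine.map (fun p => p.2 - p.1)).sum

-- ===== PRECONDITION & SPEC =====
def Spec_compute_idle (routine : List (Int × Int)) (idle : List Int) (out : Int) : Prop := out = compute_idle_alt routine idle
instance (routine : List (Int × Int)) (idle : List Int) (out : Int) : Decidable (Spec_compute_idle routine idle out) := by unfold Spec_compute_idle; infer_instance

-- ===== CLAIM (what is proved, stated in full; the proofs are below) =====
def Claim_equal_compute_idle : Prop := ∀ (routine : List (Int × Int)) (idle : List Int), Dom_compute_idle routine idle → Spec_compute_idle routine idle (compute_idle routine idle)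

-- ===== LEMMAS AND PROOFS =====

theorem compute_idle_key : ∀ (l : List (Int × Int)) (a : Int × Int) (last0 down0 : Int),
    (((a :: l).getLast?).getD (0, 0)).2
      - ((a :: l).foldl (fun (st : Int × Int) p => (p.2, st.2 + (p.1 - st.1))) (last0, down0)).2
      = ((a :: l).map (fun p => p.2 - p.1)).sum + last0 - down0 := by
  intro l
  induction l with
  | nil => intro a last0 down0; simp; ring
  | cons b t ih =>
      intro a last0 down0
      have h := ih b a.2 (down0 + (a.1 - last0))
      simp only [List.foldl, List.map, List.sum_cons, List.getLast?_cons_cons] at *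
      omega

-- ===== VERDICT (by name: the statement is the Claim_ definition above) =====
theorem compute_idle_spec : Claim_equal_compute_idle := by
  intro routine idle _
  unfold Spec_compute_idle compute_idle compute_idle_alt
  cases routine with
  | nil => simp
  | cons a l =>
      have hne : (a :: l) ≠ ([] : List (Int × Int)) := by simp
      simp only [List.isEmpty_cons, if_neg, Bool.false_eq_true, not_false_iff,
        PySem.List.pyGet?_neg_one]
      have h := compute_idle_key l a 0 0
      omega
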